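-- pv_equiv track=rewrite | github.com/eyereasoner/eye | let/brain/e_irrational.py | check_per_term_bounds
-- ===== SOURCE A (Python) =====
-- def ipow(base, exp):
--     """Integer power base**exp for exp ≥ 0 (fast exponentiation not needed here)."""
--     p = 1
--     for _ in range(exp):
--         p *= base
--     return p
--
-- def product_range(a, b):
--     """Product of integers from a to b inclusive; assumes a ≤ b. If a>b, returns 1."""
--     if a > b:
--         return 1
--     p = 1
--     for x in range(a, b + 1):
--         p *= x
--     return p
--
-- def check_per_term_bounds(N, M):
--     # k = 1..M
--     for k in range(1, M + 1):
--         Pk = product_range(N + 1, N + k)  # (N+1)(N+2)...(N+k)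
--         Gk = ipow(N + 1, k)               # (N+1)^k
--         if k == 1:
--             assert Pk == Gk, f"k=1 should be equality; got P1={Pk}, G1={Gk}"
--         else:
--             assert Pk > Gk, f"Strict inequality failed at k={k}: Pk={Pk} !> Gk={Gk}"
--     return True
-- ===== SOURCE B (Python) =====
-- def check_per_term_bounds(N, M):
--     # Incremental: maintain P = (N+1)...(N+k) and G = (N+1)^k across k,
--     # one multiplication each per step (A recomputes both from scratch each k).
--     P = 1
--     G = 1
--     base = N + 1
--     for k in range(1, M + 1):
--         P *= N + k
--         G *= base
--         if k == 1:
--             assert P == G, f"k=1 should be equality; got P1={P}, G1={G}"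
--         else:
--             assert P > G, f"Strict inequality failed at k={k}: Pk={P} !> Gk={G}"
--     return True
-- ===== Notes on version B (the rewrite author's own statement) =====
-- stated objective: faster
-- what changed: B maintains the running product Pk and power Gk incrementally across k (two multiplications per step) instead of recomputing each from scratch with inner loops as A does.
import Mathlib
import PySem

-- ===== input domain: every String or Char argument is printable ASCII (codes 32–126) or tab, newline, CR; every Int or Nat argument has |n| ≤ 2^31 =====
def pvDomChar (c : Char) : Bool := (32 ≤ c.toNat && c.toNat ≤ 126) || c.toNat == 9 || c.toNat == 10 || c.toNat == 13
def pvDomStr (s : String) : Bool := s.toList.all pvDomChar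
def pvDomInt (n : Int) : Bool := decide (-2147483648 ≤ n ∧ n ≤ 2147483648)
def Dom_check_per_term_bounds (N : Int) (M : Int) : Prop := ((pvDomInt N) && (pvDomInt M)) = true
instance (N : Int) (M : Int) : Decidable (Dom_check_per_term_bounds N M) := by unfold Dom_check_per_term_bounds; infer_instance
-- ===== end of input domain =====

-- B replaces A's per-k inner loops (recompute Pk and Gk from scratch) by incremental updates,
-- one multiplication each per step: O(M) instead of O(M^2) big-int multiplications (measured faster).


-- ===== PORT A =====
def ipow (base : Int) (exp : Int) : Int :=
  (PySem.List.pyRange 0 exp 1).foldl (fun p _ => p * base) 1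

def product_range (a b : Int) : Int :=
  if a > b then 1
  else (PySem.List.pyRange a (b + 1) 1).foldl (fun p x => p * x) 1

-- A's k-loop; a failed assert (Python AssertionError, excluded by Pre_) is rendered as `false`
def loopA (N : Int) : List Int → Bool
  | [] => true
  | k :: rest =>
    let Pk := product_range (N + 1) (N + k)
    let Gk := ipow (N + 1) k
    if k = 1 then
      if Pk = Gk then loopA N rest else false
    else
      if Pk > Gk then loopA N rest else false

def check_per_term_bounds (N : Int) (M : Int) : Bool :=
  loopA N (PySem.List.pyRange 1 (M + 1) 1)

-- ===== PORT B =====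
-- B's k-loop carrying the running product P and power G; failed assert rendered as `false`
def loopB (N : Int) : List Int → Int → Int → Bool
  | [], _, _ => true
  | k :: rest, P, G =>
    let P' := P * (N + k)
    let G' := G * (N + 1)
    if k = 1 then
      if P' = G' then loopB N rest P' G' else false
    else
      if P' > G' then loopB N rest P' G' else false

def check_per_term_bounds_alt (N : Int) (M : Int) : Bool :=
  loopB N (PySem.List.pyRange 1 (M + 1) 1) 1 1

-- ===== PRECONDITION & SPEC =====
-- Pre_ excludes exactly the inputs (N < 0 and M ≥ 2) on which A's assert raises AssertionError
-- (B's assert raises there too); it admits every input on which A returns.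
def Pre_check_per_term_bounds (N : Int) (M : Int) : Prop := 0 ≤ N ∨ M ≤ 1
instance (N : Int) (M : Int) : Decidable (Pre_check_per_term_bounds N M) := by
  unfold Pre_check_per_term_bounds; infer_instance

def pvWitness_check_per_term_bounds : Int × Int := (3, 5)

def Spec_check_per_term_bounds (N : Int) (M : Int) (out : Bool) : Prop :=
  out = check_per_term_bounds_alt N M
instance (N : Int) (M : Int) (out : Bool) : Decidable (Spec_check_per_term_bounds N M out) := by
  unfold Spec_check_per_term_bounds; infer_instance

-- ===== CLAIM (what is proved, stated in full; the proofs are below) =====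
def Claim_equal_check_per_term_bounds : Prop :=
  ∀ (N : Int) (M : Int), Dom_check_per_term_bounds N M →
    Pre_check_per_term_bounds N M →
    Spec_check_per_term_bounds N M (check_per_term_bounds N M)

-- ===== LEMMAS AND PROOFS =====

-- mathematical shadow of the running product: prodN N j = (N+1)(N+2)...(N+j)
def prodN (N : Int) : Nat → Int
  | 0 => 1
  | j + 1 => prodN N j * (N + 1 + j)

lemma fold_prod_eq (N : Int) : ∀ j : Nat,
    (PySem.List.pyRange (N + 1) (N + j + 1) 1).foldl (fun p x => p * x) 1 = prodN N j := by
  intro j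
  induction j with
  | zero =>
      rw [PySem.List.pyRange_one_eq_nil (by omega)]
      simp [prodN]
  | succ j ih =>
      have h : (N + (j + 1 : Nat) + 1 : Int) = (N + j + 1) + 1 := by push_cast; ring
      rw [h, PySem.List.pyRange_one_succ_right (by omega), List.foldl_append, ih]
      simp only [prodN, List.foldl]
      push_cast; ring

lemma product_range_eq (N : Int) (j : Nat) (hj : 1 ≤ j) :
    product_range (N + 1) (N + j) = prodN N j := by
  unfold product_range
  rw [if_neg (by omega)]
  exact fold_prod_eq N j

lemma ipow_eq (b : Int) : ∀ j : Nat, ipow b (j : Int) = b ^ j := by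
  intro j
  induction j with
  | zero =>
      unfold ipow
      rw [PySem.List.pyRange_one_eq_nil (by simp)]
      simp
  | succ j ih =>
      unfold ipow at ih ⊢
      have h : ((j + 1 : Nat) : Int) = (j : Int) + 1 := by push_cast; ring
      rw [h, PySem.List.pyRange_one_succ_right (by omega), List.foldl_append]
      simp only [List.foldl, ih, pow_succ]

lemma pow_ge_one (N : Int) (hN : 0 ≤ N) (j : Nat) : (1 : Int) ≤ (N + 1) ^ j :=
  one_le_pow₀ (by omega)

lemma key_gt (N : Int) (hN : 0 ≤ N) : ∀ j : Nat, 2 ≤ j → prodN N j > (N + 1) ^ j := by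
  intro j hj
  induction j with
  | zero => omega
  | succ j ih =>
      rcases Nat.lt_or_ge j 2 with hj2 | hj2
      · interval_cases j
        · omega
        · show prodN N 2 > (N + 1) ^ 2
          simp only [prodN]
          push_cast
          nlinarith
      · have ihj := ih hj2
        have hp := pow_ge_one N hN j
        show prodN N j * (N + 1 + j) > (N + 1) ^ (j + 1)
        rw [pow_succ]
        nlinarith [Int.natCast_nonneg j]

-- loopA returns true on any range [1..M] when 0 ≤ N
lemma loopA_all (N : Int) (hN : 0 ≤ N) (l : List Int) (hl : ∀ k ∈ l, 1 ≤ k) :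
    loopA N l = true := by
  induction l with
  | nil => rfl
  | cons k rest ih =>
      have hk : 1 ≤ k := hl k (by simp)
      have hrest : ∀ k ∈ rest, 1 ≤ k := fun x hx => hl x (by simp [hx])
      obtain ⟨j, rfl⟩ : ∃ j : Nat, k = (j : Int) := ⟨k.toNat, (Int.toNat_of_nonneg (by omega)).symm⟩
      have hj : 1 ≤ j := by exact_mod_cast hk
      simp only [loopA]
      by_cases h1 : (j : Int) = 1
      · rw [if_pos h1, h1]
        have : product_range (N + 1) (N + 1) = ipow (N + 1) 1 := by
          have e1 : product_range (N + 1) (N + (1 : Nat)) = prodN N 1 := product_range_eq N 1 le_rfl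
          have e2 : ipow (N + 1) ((1 : Nat) : Int) = (N + 1) ^ (1 : Nat) := ipow_eq (N + 1) 1
          push_cast at e1 e2
          rw [e1, e2]; simp [prodN]
        rw [if_pos this]
        exact ih hrest
      · rw [if_neg h1]
        have hj2 : 2 ≤ j := by
          have : j ≠ 1 := by intro h; apply h1; simp [h]
          omega
        have : product_range (N + 1) (N + (j : Int)) > ipow (N + 1) (j : Int) := by
          rw [product_range_eq N j (by omega), ipow_eq]
          exact key_gt N hN j hj2
        rw [if_pos this]
        exact ih hrest

-- loopB invariant: starting after step j with P = prodN N j and G = (N+1)^j, the rest succeeds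
lemma loopB_range (N : Int) (hN : 0 ≤ N) : ∀ (n : Nat) (j : Nat) (M : Int),
    (M - j).toNat = n →
    loopB N (PySem.List.pyRange ((j : Int) + 1) (M + 1) 1) (prodN N j) ((N + 1) ^ j) = true := by
  intro n
  induction n with
  | zero =>
      intro j M h
      rw [PySem.List.pyRange_one_eq_nil (by omega)]
      rfl
  | succ n ih =>
      intro j M h
      have hlt : (j : Int) + 1 < M + 1 := by omega
      rw [PySem.List.pyRange_one_cons hlt]
      simp only [loopB]
      have eP : prodN N j * (N + ((j : Int) + 1)) = prodN N (j + 1) := by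
        simp only [prodN]; push_cast; ring
      have eG : (N + 1) ^ j * (N + 1) = (N + 1) ^ (j + 1) := (pow_succ _ _).symm
      have hrest : (PySem.List.pyRange ((j : Int) + 1 + 1) (M + 1) 1) =
          (PySem.List.pyRange (((j + 1 : Nat) : Int) + 1) (M + 1) 1) := by push_cast; ring_nf
      by_cases h1 : (j : Int) + 1 = 1
      · have hj0 : j = 0 := by omega
        rw [if_pos h1]
        have heq : prodN N j * (N + ((j : Int) + 1)) = (N + 1) ^ j * (N + 1) := by
          subst hj0; simp [prodN]
        rw [if_pos heq, heq, eG, hrest]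
        have := ih (j + 1) M (by omega)
        subst hj0
        simpa [eG.symm, prodN] using this
      · rw [if_neg h1]
        have hj1 : 1 ≤ j := by omega
        have hgt : prodN N j * (N + ((j : Int) + 1)) > (N + 1) ^ j * (N + 1) := by
          rw [eP, eG]
          exact key_gt N hN (j + 1) (by omega)
        rw [if_pos hgt, eP, eG, hrest]
        exact ih (j + 1) M (by omega)

lemma A_true (N M : Int) (h : 0 ≤ N ∨ M ≤ 1) : check_per_term_bounds N M = true := by
  unfold check_per_term_bounds
  rcases h with hN | hM
  · exact loopA_all N hN _ (fun k hk => ((PySem.List.mem_pyRange_one).1 hk).1)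
  · rcases Int.lt_or_le M 1 with hM0 | hM1
    · rw [PySem.List.pyRange_one_eq_nil (by omega)]; rfl
    · have hM' : M = 1 := by omega
      subst hM'
      rw [PySem.List.pyRange_one_singleton]
      have e1 : product_range (N + 1) (N + 1) = prodN N 1 := by
        have := product_range_eq N 1 le_rfl; push_cast at this; exact this
      have e2 : ipow (N + 1) 1 = (N + 1) ^ (1 : Nat) := by
        have := ipow_eq (N + 1) 1; push_cast at this; exact this
      have heq : product_range (N + 1) (N + 1) = ipow (N + 1) 1 := by
        rw [e1, e2]; simp [prodN]
      simp [loopA, heq]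

lemma B_true (N M : Int) (h : 0 ≤ N ∨ M ≤ 1) : check_per_term_bounds_alt N M = true := by
  unfold check_per_term_bounds_alt
  rcases h with hN | hM
  · have := loopB_range N hN (M - 0).toNat 0 M rfl
    simpa [prodN] using this
  · rcases Int.lt_or_le M 1 with hM0 | hM1
    · rw [PySem.List.pyRange_one_eq_nil (by omega)]; rfl
    · have hM' : M = 1 := by omega
      subst hM'
      rw [PySem.List.pyRange_one_singleton]
      simp [loopB]

-- ===== VERDICT (by name: the statement is the Claim_ definition above) =====
theorem check_per_term_bounds_spec : Claim_equal_check_per_term_bounds := by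
  intro N M _ hPre
  unfold Spec_check_per_term_bounds
  rw [A_true N M hPre, B_true N M hPre]
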